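-- pv_equiv track=rewrite | github.com/NicoKNL/coding-problems | problems/advent-of-code/2015/05/sol1.py | threeOrMoreVowels
-- ===== SOURCE A (Python) =====
-- VOWELS = "aeiou"
--
-- def threeOrMoreVowels(s):
--     count = 0
--     for c in s:
--         if c in VOWELS:
--             count += 1
--             if count >= 3:
--                 return True
--     return False
-- ===== SOURCE B (Python) =====
-- VOWELS = "aeiou"
--
-- def threeOrMoreVowels(s):
--     return sum(s.count(v) for v in VOWELS) >= 3
-- ===== Notes on version B (the rewrite author's own statement) =====
-- stated objective: idiomatic
-- what changed: Instead of scanning s character by character with a running counter and an early return, B iterates over the five vowels, tallies each vowel's occurrences with str.count, and compares the total against 3.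
import Mathlib
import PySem

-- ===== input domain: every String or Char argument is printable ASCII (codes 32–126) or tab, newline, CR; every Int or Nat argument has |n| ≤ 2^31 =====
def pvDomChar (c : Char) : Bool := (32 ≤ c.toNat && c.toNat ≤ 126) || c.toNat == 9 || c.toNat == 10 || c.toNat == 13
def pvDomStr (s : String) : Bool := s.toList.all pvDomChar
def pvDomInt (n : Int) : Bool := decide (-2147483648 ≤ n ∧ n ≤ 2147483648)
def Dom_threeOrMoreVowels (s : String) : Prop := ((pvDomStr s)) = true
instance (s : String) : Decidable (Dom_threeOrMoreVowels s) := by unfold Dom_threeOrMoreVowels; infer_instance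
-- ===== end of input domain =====

-- B replaces A's per-character scan with early exit by an idiomatic sum of str.count over the five vowels compared against 3.


-- ===== PORT A =====
-- the 'for c in s' loop with the running count and the early 'return True'
def vowelLoopA (cs : List Char) (count : Int) : Bool :=
  match cs with
  | [] => false
  | c :: rest =>
    if PySem.Str.isIn (String.ofList [c]) "aeiou" then
      if count + 1 ≥ 3 then true else vowelLoopA rest (count + 1)
    else vowelLoopA rest count

def threeOrMoreVowels (s : String) : Bool := vowelLoopA s.toList 0

-- ===== PORT B =====
-- sum(s.count(v) for v in VOWELS) >= 3
def threeOrMoreVowels_alt (s : String) : Bool :=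
  decide (3 ≤ ("aeiou".toList.map (fun v => (PySem.Str.count s (String.ofList [v]) : Int))).sum)

-- ===== PRECONDITION & SPEC =====
def Spec_threeOrMoreVowels (s : String) (out : Bool) : Prop := out = threeOrMoreVowels_alt s
instance (s : String) (out : Bool) : Decidable (Spec_threeOrMoreVowels s out) := by unfold Spec_threeOrMoreVowels; infer_instance

-- ===== CLAIM (what is proved, stated in full; the proofs are below) =====
def Claim_equal_threeOrMoreVowels : Prop := ∀ (s : String), Dom_threeOrMoreVowels s → Spec_threeOrMoreVowels s (threeOrMoreVowels s)

-- ===== LEMMAS AND PROOFS =====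

-- single-character 'c in VOWELS' is list membership of the character
lemma isIn_singleton_iff (c : Char) (t : String) :
    PySem.Str.isIn (String.ofList [c]) t = decide (c ∈ t.toList) := by
  by_cases h : c ∈ t.toList
  · have hinf : (String.ofList [c]).toList <:+: t.toList := by
      obtain ⟨l1, l2, hs⟩ := List.append_of_mem h
      exact ⟨l1, l2, by rw [hs]; simp⟩
    rw [(PySem.Str.isIn_iff_infix _ _).mpr hinf]
    simp [h]
  · have hni : ¬ ((String.ofList [c]).toList <:+: t.toList) := by
      intro hinf
      exact h (hinf.mem (by simp))
    rcases hb : PySem.Str.isIn (String.ofList [c]) t with _ | _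
    · simp [h]
    · exact absurd ((PySem.Str.isIn_iff_infix _ _).mp hb) hni

-- count.go with a single-character needle counts occurrences, given enough fuel
lemma count_go_singleton (v : Char) : ∀ (fuel : Nat) (l : List Char) (acc : Nat),
    l.length ≤ fuel →
    PySem.Chars.count.go [v] fuel l acc = acc + l.count v := by
  intro fuel
  induction fuel with
  | zero => intro l acc h; rw [List.length_eq_zero_iff.mp (Nat.le_zero.mp h)]; rfl
  | succ n ih =>
    intro l acc h
    cases l with
    | nil => rfl
    | cons c t =>
      by_cases hv : c = v
      · have hp : List.isPrefixOf [v] (c :: t) = true := by simp [List.isPrefixOf, hv]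
        rw [PySem.Chars.count.go, if_pos hp]
        simp only [List.length_singleton, List.drop_one, List.tail_cons]
        rw [ih t (acc + 1) (by simpa using h)]
        simp [List.count_cons, hv]
        omega
      · rw [PySem.Chars.count.go, if_neg (by simp [List.isPrefixOf]; exact Ne.symm hv)]
        rw [ih t acc (by simpa using h)]
        simp [List.count_cons]
        exact hv

lemma str_count_singleton (s : String) (v : Char) :
    PySem.Str.count s (String.ofList [v]) = s.toList.count v := by
  rw [PySem.Str.count]
  have h1 : (String.ofList [v]).toList = [v] := by simp
  rw [h1, PySem.Chars.count, if_neg (by simp)]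
  simpa using count_go_singleton v s.toList.length s.toList 0 le_rfl

-- splitting countP over a cons of disjoint vowel alternatives
lemma countP_mem_cons (l : List Char) (v : Char) (vs : List Char) (hv : v ∉ vs) :
    l.countP (fun c => decide (c ∈ v :: vs))
      = l.count v + l.countP (fun c => decide (c ∈ vs)) := by
  induction l with
  | nil => rfl
  | cons c t ih =>
    simp only [List.countP_cons, List.count_cons, ih]
    by_cases hc : c = v
    · subst hc
      simp [hv]
      omega
    · simp only [List.mem_cons, hc, false_or]
      have hb : (c == v) = false := by simp [hc]
      rw [hb]
      by_cases hm : c ∈ vs <;> simp [hm] <;> omega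

lemma sum_counts_eq_countP (l : List Char) : ∀ (vs : List Char), vs.Nodup →
    (vs.map (fun v => (l.count v : Int))).sum
      = (l.countP (fun c => decide (c ∈ vs)) : Int) := by
  intro vs
  induction vs with
  | nil => intro _; simp
  | cons v vs ih =>
    intro hnd
    rw [List.nodup_cons] at hnd
    rw [List.map_cons, List.sum_cons, ih hnd.2, countP_mem_cons l v vs hnd.1]
    push_cast
    ring

-- the loop of A decides 'count + remaining vowels ≥ 3' while count stays below 3
lemma vowelLoopA_eq (cs : List Char) : ∀ (n : Int), 0 ≤ n → n < 3 →
    vowelLoopA cs n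
      = decide (3 ≤ n + (cs.countP (fun c => PySem.Str.isIn (String.ofList [c]) "aeiou") : Int)) := by
  induction cs with
  | nil => intro n h0 h3; simp [vowelLoopA]; omega
  | cons c t ih =>
    intro n h0 h3
    rw [vowelLoopA]
    by_cases hv : PySem.Str.isIn (String.ofList [c]) "aeiou"
    · rw [if_pos hv]
      simp only [List.countP_cons, hv, if_pos rfl]
      by_cases h2 : n + 1 ≥ 3
      · rw [if_pos (by exact h2)]
        have : (0 : Int) ≤ (t.countP (fun c => PySem.Str.isIn (String.ofList [c]) "aeiou") : Int) := by
          positivity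
        symm; simp only [decide_eq_true_iff]; push_cast; omega
      · rw [if_neg (by exact h2), ih (n + 1) (by omega) (by omega)]
        simp only [decide_eq_decide]
        push_cast
        omega
    · rw [if_neg hv]
      simp only [List.countP_cons, hv, if_neg]
      rw [ih n h0 h3]
      simp

-- ===== VERDICT (by name: the statement is the Claim_ definition above) =====
theorem threeOrMoreVowels_spec : Claim_equal_threeOrMoreVowels := by
  intro s _
  unfold Spec_threeOrMoreVowels threeOrMoreVowels threeOrMoreVowels_alt
  rw [vowelLoopA_eq s.toList 0 le_rfl (by norm_num)]
  have hmap : ("aeiou".toList.map (fun v => (PySem.Str.count s (String.ofList [v]) : Int)))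
      = ("aeiou".toList.map (fun v => (s.toList.count v : Int))) := by
    apply List.map_congr_left; intro v _; rw [str_count_singleton]
  rw [hmap, sum_counts_eq_countP s.toList "aeiou".toList (by decide)]
  have hpred : (s.toList.countP (fun c => PySem.Str.isIn (String.ofList [c]) "aeiou"))
      = (s.toList.countP (fun c => decide (c ∈ "aeiou".toList))) := by
    apply List.countP_congr; intro c _; rw [isIn_singleton_iff]
  rw [hpred]
  simp
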